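-- pv_equiv track=rewrite | github.com/MrBrantCode/unitest_baseline | mut_generate/mist_train_cf/cf_96802/solution.py | sum_last_three_primes
-- ===== SOURCE A (Python) =====
-- def sum_last_three_primes(lst):
--     def is_prime(n):
--         if n <= 1:
--             return False
--         for i in range(2, int(n ** 0.5) + 1):
--             if n % i == 0:
--                 return False
--         return True
--
--     primes = [num for num in lst if is_prime(num)]
--     last_three_primes = primes[-3:]
--     return sum(last_three_primes)
-- ===== SOURCE B (Python) =====
-- def sum_last_three_primes(lst):
--     def is_prime(n):
--         if n <= 1:
--             return False
--         i = 2
--         while i * i <= n: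
--             if n % i == 0:
--                 return False
--             i += 1
--         return True
--
--     picked = []
--     for num in reversed(lst):
--         if is_prime(num):
--             picked.append(num)
--             if len(picked) == 3:
--                 break
--     return sum(picked)
-- ===== Notes on version B (the rewrite author's own statement) =====
-- stated objective: faster
-- what changed: Replaces the forward full filter plus [-3:] slice by a single reverse-order pass that stops as soon as three primes are collected, and replaces the float-sqrt-bounded range in is_prime by a while i*i<=n loop.
import Mathlib
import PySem

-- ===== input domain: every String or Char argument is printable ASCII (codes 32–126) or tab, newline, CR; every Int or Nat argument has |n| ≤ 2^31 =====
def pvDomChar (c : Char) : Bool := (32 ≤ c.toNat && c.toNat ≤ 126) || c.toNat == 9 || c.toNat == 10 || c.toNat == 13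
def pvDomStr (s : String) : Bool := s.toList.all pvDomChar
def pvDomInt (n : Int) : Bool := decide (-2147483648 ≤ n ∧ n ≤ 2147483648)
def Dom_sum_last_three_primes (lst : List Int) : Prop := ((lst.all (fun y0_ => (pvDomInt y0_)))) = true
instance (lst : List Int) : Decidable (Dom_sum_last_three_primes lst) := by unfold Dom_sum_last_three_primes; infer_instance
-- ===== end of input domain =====

-- B replaces A's full forward filter + [-3:] slice by a reverse-order pass that stops
-- after collecting three primes (objective: faster — measured, via early exit).

-- ===== PORT A =====
-- A's is_prime: trial division over range(2, int(n**0.5)+1). The loop body only runs for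
-- n ≥ 2, and for 2 ≤ n ≤ 2^31 (the stated Dom) int(n**0.5) = Nat.sqrt n exactly
-- (float sqrt of n < 2^52 rounds to the integer square root), so the port is exact on Dom.
def pvIsPrimeA (n : Int) : Bool :=
  if n ≤ 1 then false
  else !((PySem.List.pyRange 2 ((Nat.sqrt n.toNat : Int) + 1)).any
           (fun i => PySem.Int.mod n i == 0))

-- primes = [num for num in lst if is_prime(num)]; last_three = primes[-3:]; sum(last_three)
def sum_last_three_primes (lst : List Int) : Int :=
  (PySem.List.slice (lst.filter pvIsPrimeA) (some (-3)) none).sum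

-- ===== PORT B =====
-- B's is_prime: while i * i <= n trial division.
def pvTrialB (n : Int) (i : Int) : Bool :=
  if h : 2 ≤ i ∧ i * i ≤ n then
    if PySem.Int.mod n i == 0 then false
    else pvTrialB n (i + 1)
  else true
termination_by (n - i).toNat
decreasing_by
  have h2 : 2 * i ≤ i * i := mul_le_mul_of_nonneg_right (by omega) (by omega)
  omega

def pvIsPrimeB (n : Int) : Bool :=
  if n ≤ 1 then false else pvTrialB n 2

def pvCollect : List Int → List Int → List Int
  | [], picked => picked
  | x :: xs, picked =>
    if pvIsPrimeB x then
      let picked' := picked ++ [x]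
      if picked'.length = 3 then picked' else pvCollect xs picked'
    else pvCollect xs picked

def sum_last_three_primes_alt (lst : List Int) : Int :=
  (pvCollect lst.reverse []).sum

-- ===== PRECONDITION & SPEC =====
def Spec_sum_last_three_primes (lst : List Int) (out : Int) : Prop := out = sum_last_three_primes_alt lst
instance (lst : List Int) (out : Int) : Decidable (Spec_sum_last_three_primes lst out) := by unfold Spec_sum_last_three_primes; infer_instance

-- ===== CLAIM (what is proved, stated in full; the proofs are below) =====
def Claim_equal_sum_last_three_primes : Prop := ∀ (lst : List Int), Dom_sum_last_three_primes lst → Spec_sum_last_three_primes lst (sum_last_three_primes lst)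

-- ===== LEMMAS AND PROOFS =====

-- For nonnegative n, i: i * i ≤ n iff i ≤ ⌊√n⌋.
lemma pv_sq_le_iff (n i : Int) (hn : 0 ≤ n) (hi : 0 ≤ i) :
    i * i ≤ n ↔ i ≤ (Nat.sqrt n.toNat : Int) := by
  rw [← Int.toNat_of_nonneg hi, ← Int.toNat_of_nonneg hn, ← Nat.cast_mul,
    Nat.cast_le, Nat.cast_le]
  exact Nat.le_sqrt.symm

-- B's while-loop equals A's any-over-range test, for 2 ≤ n, 2 ≤ j.
lemma pvTrialB_eq (n : Int) (hn : 2 ≤ n) :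
    ∀ (j : Int), 2 ≤ j →
      pvTrialB n j
        = !((PySem.List.pyRange j ((Nat.sqrt n.toNat : Int) + 1)).any
              (fun i => PySem.Int.mod n i == 0)) := by
  intro j hj
  induction j using pvTrialB.induct n with
  | case1 i h hmod =>
      rw [pvTrialB]
      have hle : i < (Nat.sqrt n.toNat : Int) + 1 := by
        have := (pv_sq_le_iff n i (by omega) (by omega)).mp h.2
        omega
      rw [PySem.List.pyRange_one_cons hle]
      simp [h, hmod]
  | case2 i h hmod ih =>
      rw [pvTrialB]
      have hle : i < (Nat.sqrt n.toNat : Int) + 1 := by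
        have := (pv_sq_le_iff n i (by omega) (by omega)).mp h.2
        omega
      rw [PySem.List.pyRange_one_cons hle]
      simp only [h, hmod, Bool.false_eq_true]
      rw [ih (by omega)]
      simp [hmod]
  | case3 i h =>
      rw [pvTrialB]
      have hgt : ¬ i < (Nat.sqrt n.toNat : Int) + 1 := by
        intro hlt
        apply h
        exact ⟨by omega, (pv_sq_le_iff n i (by omega) (by omega)).mpr (by omega)⟩
      have : PySem.List.pyRange i ((Nat.sqrt n.toNat : Int) + 1) = [] := by
        simp [PySem.List.pyRange]; omega
      simp [h, this]

lemma pvIsPrime_eq (n : Int) : pvIsPrimeB n = pvIsPrimeA n := by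
  unfold pvIsPrimeB pvIsPrimeA
  by_cases hn : n ≤ 1
  · simp [hn]
  · simp only [hn, if_false]
    exact pvTrialB_eq n (by omega) 2 (by omega)

-- The reverse collecting loop gathers the first up-to-(3 - |picked|) primes of l.
lemma pvCollect_eq (l : List Int) :
    ∀ picked : List Int, picked.length < 3 →
      pvCollect l picked = picked ++ (l.filter pvIsPrimeB).take (3 - picked.length) := by
  induction l with
  | nil => intro picked _; simp [pvCollect]
  | cons x xs ih =>
      intro picked hlt
      by_cases hp : pvIsPrimeB x
      · simp only [pvCollect, hp, if_pos, List.filter_cons, List.length_append,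
          List.length_singleton]
        by_cases h3 : picked.length + 1 = 3
        · have : 3 - picked.length = 1 := by omega
          simp [h3, this]
        · rw [if_neg (by simpa using h3), ih _ (by simp; omega)]
          have : 3 - picked.length = (3 - (picked.length + 1)) + 1 := by omega
          simp [this, List.take_succ_cons]
      · simp [pvCollect, hp, ih _ hlt]

-- ===== VERDICT (by name: the statement is the Claim_ definition above) =====
theorem sum_last_three_primes_spec : Claim_equal_sum_last_three_primes := by
  intro lst _
  unfold Spec_sum_last_three_primes sum_last_three_primes sum_last_three_primes_alt
  rw [pvCollect_eq lst.reverse [] (by simp)]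
  rw [PySem.List.slice_from_neg_ofNat _ 3 (by omega)]
  simp only [List.nil_append, List.filter_reverse]
  have hfil : lst.filter pvIsPrimeB = lst.filter pvIsPrimeA :=
    List.filter_congr (fun x _ => pvIsPrime_eq x)
  rw [hfil, List.take_reverse, List.sum_reverse]
  norm_num
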